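-- pv_equiv track=rewrite | github.com/GGajanan1/E-Commerce-Main | ai-voice-assistant/src/tools/direct_mongodb_query_tool.py | _flexible_category_match
-- ===== SOURCE A (Python) =====
-- from typing import Dict, List, Any, Optional
--
-- def _flexible_category_match(product_category: str, search_categories: List[str]) -> bool:
--     """
--     Flexible category matching that considers related categories
--     """
--     # Direct match first
--     if product_category in search_categories:
--         return True
--
--     # Category mappings for flexible matching
--     category_mappings = {
--         'T-Shirts': ['Formal', 'Casual', 'T-Shirts'],  # T-shirts can be formal or casual
--         'Shirts': ['Formal', 'Casual', 'T-Shirts'],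
--         'Dresses': ['Dresses', 'Ethnic Wear', 'Casual'],
--         'Jackets': ['Jackets', 'Winterwear', 'Casual'],
--         'Pants': ['Casual', 'Formal', 'Outdoor'],
--         'Jeans': ['Casual', 'Outdoor']
--     }
--
--     # Check if any of the search categories map to the product category
--     for search_cat in search_categories:
--         if search_cat in category_mappings:
--             if product_category in category_mappings[search_cat]:
--                 return True
--
--     # Check reverse mapping - if product category maps to search categories
--     if product_category in category_mappings:
--         for search_cat in search_categories:
--             if search_cat in category_mappings[product_category]:
--                 return True
--
--     return False
-- ===== SOURCE B (Python) =====
-- def _flexible_category_match(product_category, search_categories):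
--     category_mappings = {
--         'T-Shirts': ['Formal', 'Casual', 'T-Shirts'],
--         'Shirts': ['Formal', 'Casual', 'T-Shirts'],
--         'Dresses': ['Dresses', 'Ethnic Wear', 'Casual'],
--         'Jackets': ['Jackets', 'Winterwear', 'Casual'],
--         'Pants': ['Casual', 'Formal', 'Outdoor'],
--         'Jeans': ['Casual', 'Outdoor']
--     }
--     # one set of acceptable categories, built up front
--     allowed = {product_category}
--     allowed.update(category_mappings.get(product_category, []))
--     allowed.update(k for k, v in category_mappings.items() if product_category in v)
--     return any(c in allowed for c in search_categories)
-- ===== Notes on version B (the rewrite author's own statement) =====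
-- stated objective: simpler
-- what changed: A's three sequential scans/branches (direct membership, forward-mapping loop with dict lookups, reverse-mapping loop) are collapsed into one precomputed set of acceptable categories ({product} ∪ mapping.get(product,[]) ∪ reverse-index keys) followed by a single membership pass over the search list.
import Mathlib
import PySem

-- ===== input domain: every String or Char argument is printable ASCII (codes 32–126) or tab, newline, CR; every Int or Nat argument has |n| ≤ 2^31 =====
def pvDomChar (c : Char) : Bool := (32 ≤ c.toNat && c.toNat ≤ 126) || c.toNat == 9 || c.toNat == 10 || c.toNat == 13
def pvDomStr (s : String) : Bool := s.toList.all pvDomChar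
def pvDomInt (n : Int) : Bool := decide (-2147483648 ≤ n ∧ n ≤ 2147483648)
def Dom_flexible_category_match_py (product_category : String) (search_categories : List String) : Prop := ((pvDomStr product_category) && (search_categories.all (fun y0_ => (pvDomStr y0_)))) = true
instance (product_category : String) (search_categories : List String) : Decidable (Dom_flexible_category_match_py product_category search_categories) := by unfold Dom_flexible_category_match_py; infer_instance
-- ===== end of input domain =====

-- B replaces A's three sequential scans/branches by one precomputed set of acceptable
-- categories followed by a single membership pass over the search list (objective: simpler).

-- ===== PORT A =====
-- the fixed category_mappings dict literal, identical in both Pythons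
def category_mappings : List (String × List String) :=
  [("T-Shirts", ["Formal", "Casual", "T-Shirts"]),
   ("Shirts", ["Formal", "Casual", "T-Shirts"]),
   ("Dresses", ["Dresses", "Ethnic Wear", "Casual"]),
   ("Jackets", ["Jackets", "Winterwear", "Casual"]),
   ("Pants", ["Casual", "Formal", "Outdoor"]),
   ("Jeans", ["Casual", "Outdoor"])]

def flexible_category_match_py (product_category : String) (search_categories : List String) : Bool :=
  -- direct match first
  if search_categories.contains product_category then true
  else
    let cm : PySem.Dict String (List String) := PySem.Dict.mk category_mappings
    -- for search_cat in search_categories: if search_cat in cm: if product in cm[search_cat]: return True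
    if search_categories.any (fun sc => cm.contains sc && (cm.getD sc []).contains product_category) then true
    -- reverse mapping: if product in cm: for search_cat in search_categories: if search_cat in cm[product]: return True
    else if cm.contains product_category then
      search_categories.any (fun sc => (cm.getD product_category []).contains sc)
    else false

-- ===== PORT B =====
def flexible_category_match_py_alt (product_category : String) (search_categories : List String) : Bool :=
  let cm : PySem.Dict String (List String) := PySem.Dict.mk category_mappings
  -- allowed = {product} ∪ cm.get(product, []) ∪ {k for k, v in cm.items() if product in v}
  let allowed : PySem.Set String :=
    PySem.Set.update
      (PySem.Set.update (PySem.Set.ofList [product_category]) (cm.getD product_category []))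
      ((category_mappings.filter (fun kv => kv.2.contains product_category)).map (fun kv => kv.1))
  -- any(c in allowed for c in search_categories)
  search_categories.any (fun c => PySem.Set.contains allowed c)

-- ===== PRECONDITION & SPEC =====
def Spec_flexible_category_match_py (product_category : String) (search_categories : List String) (out : Bool) : Prop := out = flexible_category_match_py_alt product_category search_categories
instance (product_category : String) (search_categories : List String) (out : Bool) : Decidable (Spec_flexible_category_match_py product_category search_categories out) := by unfold Spec_flexible_category_match_py; infer_instance

-- ===== CLAIM (what is proved, stated in full; the proofs are below) =====
def Claim_equal_flexible_category_match_py : Prop := ∀ (product_category : String) (search_categories : List String), Dom_flexible_category_match_py product_category search_categories → Spec_flexible_category_match_py product_category search_categories (flexible_category_match_py product_category search_categories)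

-- ===== LEMMAS AND PROOFS =====

-- A's inner pass-2 test "sc is a key of m and p is in m[sc]" holds exactly when sc is one of
-- B's reverse-index keys (keys of m whose mapped list contains p); needs the keys to be distinct.
theorem revkey_mem (m : List (String × List String)) (hm : (m.map Prod.fst).Nodup) (p c : String) :
    (((PySem.Dict.mk m).get? c).elim false (fun lst => lst.contains p)) = true
      ↔ c ∈ (m.filter (fun kv => kv.2.contains p)).map (fun kv => kv.1) := by
  induction m with
  | nil => simp [PySem.Dict.get?]
  | cons kv rest ih =>
    obtain ⟨k, v⟩ := kv
    simp only [List.map_cons, List.nodup_cons] at hm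
    rw [PySem.Dict.get?_mk_cons]
    by_cases hp : p ∈ v
    · have hf : List.filter (fun kv => kv.2.contains p) ((k, v) :: rest)
          = (k, v) :: List.filter (fun kv => kv.2.contains p) rest := by
        simp [hp]
      rw [hf]
      by_cases hk : k = c
      · subst hk; simp [hp]
      · have hbeq : (k == c) = false := by simpa using hk
        rw [hbeq]
        simp only [Bool.false_eq_true, if_neg, not_false_eq_true, List.map_cons, List.mem_cons]
        rw [ih hm.2]
        exact ⟨fun h => Or.inr h, fun h => h.resolve_left (fun he => hk he.symm)⟩
    · have hf : List.filter (fun kv => kv.2.contains p) ((k, v) :: rest)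
          = List.filter (fun kv => kv.2.contains p) rest := by
        simp [hp]
      rw [hf]
      by_cases hk : k = c
      · subst hk
        simp only [beq_self_eq_true, if_pos, Option.elim_some]
        have hniml : k ∉ (rest.filter (fun kv => kv.2.contains p)).map (fun kv => kv.1) := by
          intro hmem
          obtain ⟨kv', hkv', hfst⟩ := List.mem_map.mp hmem
          exact hm.1 (hfst ▸ List.mem_map_of_mem (List.mem_filter.mp hkv').1)
        have hcp : (v.contains p) = false := by simpa [List.contains_eq_mem] using hp
        rw [hcp]
        exact ⟨fun h => absurd h (by simp), fun h => absurd h hniml⟩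
      · have hbeq : (k == c) = false := by simpa using hk
        rw [hbeq]
        simp only [Bool.false_eq_true, if_neg, not_false_eq_true]
        exact ih hm.2

-- A's guarded lookup "c in d and p in d[c]" in Option form
theorem contains_and_getD (d : PySem.Dict String (List String)) (c p : String) :
    (d.contains c && (d.getD c []).contains p) = (d.get? c).elim false (fun lst => lst.contains p) := by
  rw [PySem.Dict.contains_eq_isSome_get?, PySem.Dict.getD_eq_get?_getD]
  cases d.get? c <;> simp

theorem main_eq (p : String) (s : List String) :
    flexible_category_match_py p s = flexible_category_match_py_alt p s := by
  have hnd : (category_mappings.map Prod.fst).Nodup := by decide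
  unfold flexible_category_match_py flexible_category_match_py_alt
  rw [Bool.eq_iff_iff]
  simp only [contains_and_getD]
  constructor
  · intro h
    split_ifs at h with h1 h2 h3
    · simp only [List.any_eq_true]
      refine ⟨p, by simpa using h1, ?_⟩
      simp [PySem.Set.mem_update, PySem.Set.mem_ofList]
    · simp only [List.any_eq_true] at h2 ⊢
      obtain ⟨c, hc, hcc⟩ := h2
      refine ⟨c, hc, ?_⟩
      rw [revkey_mem _ hnd] at hcc
      simp only [PySem.Set.contains_eq_listContains, List.contains_eq_mem, decide_eq_true_eq,
        PySem.Set.mem_update]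
      exact Or.inr (by simpa using hcc)
    · simp only [List.any_eq_true] at h ⊢
      obtain ⟨c, hc, hcc⟩ := h
      refine ⟨c, hc, ?_⟩
      simp only [List.contains_eq_mem, decide_eq_true_eq] at hcc
      simp only [PySem.Set.contains_eq_listContains, List.contains_eq_mem, decide_eq_true_eq,
        PySem.Set.mem_update]
      exact Or.inl (Or.inr hcc)
  · intro h
    simp only [List.any_eq_true] at h
    obtain ⟨c, hc, hcc⟩ := h
    simp only [PySem.Set.contains_eq_listContains, List.contains_eq_mem, decide_eq_true_eq,
      PySem.Set.mem_update, PySem.Set.mem_ofList, List.mem_singleton] at hcc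
    by_cases h1 : s.contains p = true
    · rw [if_pos h1]
    · rw [if_neg h1]
      by_cases h2 : (s.any fun sc =>
          ((PySem.Dict.mk category_mappings).get? sc).elim false fun lst => lst.contains p) = true
      · rw [if_pos h2]
      · rw [if_neg h2]
        rcases hcc with (hcp | hfwd) | hrev
        · exact absurd (by simpa [List.contains_eq_mem] using (hcp ▸ hc : p ∈ s) : s.contains p = true) h1
        · by_cases h3 : (PySem.Dict.mk category_mappings).contains p = true
          · rw [if_pos h3]
            exact List.any_eq_true.mpr ⟨c, hc, by simpa [List.contains_eq_mem] using hfwd⟩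
          · exfalso
            simp only [Bool.not_eq_true] at h3
            rw [PySem.Dict.getD_of_not_contains _ _ h3] at hfwd
            simp at hfwd
        · exact absurd (List.any_eq_true.mpr ⟨c, hc,
            (revkey_mem category_mappings hnd p c).mpr (by simpa using hrev)⟩) h2

-- ===== VERDICT (by name: the statement is the Claim_ definition above) =====
theorem flexible_category_match_py_spec : Claim_equal_flexible_category_match_py := by
  intro p s _
  unfold Spec_flexible_category_match_py
  exact main_eq p s
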